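-- pv_equiv track=rewrite | github.com/paulklemstine/factor | lean/demo/New/ComplexityTheory1/demos/sensitivity_demo.py | vc_dimension
-- ===== SOURCE A (Python) =====
-- import itertools
-- from typing import Callable, List, Tuple, Set
--
-- def shatters(family: List[Set[int]], target: Set[int]) -> bool:
--     """Check if a family of sets shatters the target set."""
--     target_list = sorted(target)
--     needed = set()
--     for subset_bits in range(2 ** len(target_list)):
--         subset = frozenset(target_list[j] for j in range(len(target_list))
--                           if subset_bits & (1 << j))
--         needed.add(subset)
--
--     achieved = set()
--     for S in family:
--         intersection = frozenset(target & S)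
--         achieved.add(intersection)
--
--     return needed <= achieved
--
-- def vc_dimension(family: List[Set[int]], universe_size: int) -> int:
--     """Compute the VC dimension of a family of sets."""
--     best = 0
--     for size in range(universe_size + 1):
--         found = False
--         for target in itertools.combinations(range(universe_size), size):
--             if shatters(family, set(target)):
--                 found = True
--                 best = size
--                 break
--         if not found:
--             break
--     return best
-- ===== SOURCE B (Python) =====
-- import itertools
--
-- def vc_dimension(family, universe_size):
--     """Compute the VC dimension of a family of sets.
--
--     Top-down search: shattering is downward closed, so the first size
--     (scanning from an upper bound down to 0) admitting a shattered target
--     is the VC dimension.  Every element of a nonempty shattered target must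
--     occur in some family set, so targets are drawn from the family's support
--     within range(universe_size); a target of size s needs 2**s distinct
--     intersections, so sizes above log2(len(family)) are impossible.
--     """
--     if not family:
--         return 0
--     support = sorted({x for S in family for x in S if 0 <= x < universe_size})
--     hi = min(len(support), len(family).bit_length() - 1)
--     for size in range(hi, -1, -1):
--         for target in itertools.combinations(support, size):
--             t = set(target)
--             if len({frozenset(t & S) for S in family}) == 2 ** size:
--                 return size
--     return 0
-- ===== Notes on version B (the rewrite author's own statement) =====
-- stated objective: alternative
-- what changed: vc_dimension now searches top-down: it scans sizes from min(universe_size, log2(len(family))) down to 0 and returns the first size with a shattered target (valid because shattering is downward closed and 2**size distinct intersections need 2**size sets), with the shatters test inlined as counting distinct intersections instead of generating and subset-testing all 2**size required subsets; A's bottom-up accumulate-and-break loop and its needed/achieved subset check are gone.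
import Mathlib
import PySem

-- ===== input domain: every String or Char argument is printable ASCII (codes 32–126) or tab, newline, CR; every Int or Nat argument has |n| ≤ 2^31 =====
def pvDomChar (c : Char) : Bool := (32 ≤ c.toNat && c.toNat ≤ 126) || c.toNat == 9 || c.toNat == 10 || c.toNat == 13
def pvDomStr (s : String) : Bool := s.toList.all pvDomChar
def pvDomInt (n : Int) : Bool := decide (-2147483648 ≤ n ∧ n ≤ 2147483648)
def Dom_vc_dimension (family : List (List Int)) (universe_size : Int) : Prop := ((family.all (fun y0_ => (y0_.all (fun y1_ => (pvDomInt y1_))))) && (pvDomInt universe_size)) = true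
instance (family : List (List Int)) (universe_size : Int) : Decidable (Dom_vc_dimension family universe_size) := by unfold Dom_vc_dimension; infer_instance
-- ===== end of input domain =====

-- B searches sizes top-down from min(universe_size, log2 |family|), returning the first size with a
-- shattered target, and tests shattering by counting distinct intersections; equal to A because
-- shattering is downward closed (proved below).  Frozensets are represented canonically as sorted
-- duplicate-free lists (every target here is a sorted duplicate-free combination of range(n)).

-- ===== PORT A =====
-- subset of target_list selected by the bits of `bits`; `bits & (1 << j)` truthiness is exactly Nat.testBit
def pvMaskSub (tl : List Int) (bits : Nat) : List Int :=
  (List.range tl.length).filterMap (fun j => if bits.testBit j then tl[j]? else none)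

def pvShattersA (family : List (List Int)) (target : List Int) : Bool :=
  let tl := PySem.List.sorted target (fun x => x) false
  let needed := PySem.Set.ofList ((List.range (2 ^ tl.length)).map (fun bits => pvMaskSub tl bits))
  let achieved := PySem.Set.ofList (family.map (fun S => tl.filter (fun x => S.contains x)))
  PySem.Set.issubset needed achieved

-- itertools.combinations(range(u), k) = the length-k sublists of range(u); only `any` consumes it,
-- so the enumeration order (irrelevant to the result) may differ from itertools' lexicographic order.
def pvALoop (family : List (List Int)) (u : Int) : List Int → Int → Int
  | [], best => best
  | size :: rest, best =>
      if (List.sublistsLen size.toNat (PySem.List.pyRange 0 u 1)).any (fun t => pvShattersA family t)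
      then pvALoop family u rest size
      else best

def vc_dimension (family : List (List Int)) (universe_size : Int) : Int :=
  pvALoop family universe_size (PySem.List.pyRange 0 (universe_size + 1) 1) 0

-- ===== PORT B =====
-- len({frozenset(t & S) for S in family}) == 2 ** size; targets are sorted and duplicate-free, so
-- `target.filter (· ∈ S)` is the canonical (sorted duplicate-free) representation of frozenset(t & S)
def pvShattersB (family : List (List Int)) (target : List Int) (size : Nat) : Bool :=
  (PySem.Set.ofList (family.map (fun S => target.filter (fun x => S.contains x)))).length == 2 ^ size

-- sorted({x for S in family for x in S if 0 <= x < universe_size}); the set comprehension is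
-- Set.ofList of the flattened filtered elements, canonical after sorting (sorted has no key)
def pvSupport (family : List (List Int)) (universe_size : Int) : List Int :=
  PySem.List.sorted
    (PySem.Set.ofList (family.flatMap (fun S => S.filter (fun x => decide (0 ≤ x ∧ x < universe_size)))))
    (fun x => x) false

def pvBLoop (family : List (List Int)) (support : List Int) : List Int → Int
  | [] => 0
  | size :: rest =>
      if (List.sublistsLen size.toNat support).any (fun t => pvShattersB family t size.toNat)
      then size else pvBLoop family support rest

def vc_dimension_alt (family : List (List Int)) (universe_size : Int) : Int :=
  if family = [] then 0
  else
    pvBLoop family (pvSupport family universe_size)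
      (PySem.List.pyRange
        (min ((pvSupport family universe_size).length : Int)
          ((PySem.Int.bitLength (family.length : Int) : Int) - 1)) (-1) (-1))

-- ===== PRECONDITION & SPEC =====
def Spec_vc_dimension (family : List (List Int)) (universe_size : Int) (out : Int) : Prop := out = vc_dimension_alt family universe_size
instance (family : List (List Int)) (universe_size : Int) (out : Int) : Decidable (Spec_vc_dimension family universe_size out) := by unfold Spec_vc_dimension; infer_instance

-- ===== CLAIM (what is proved, stated in full; the proofs are below) =====
def Claim_equal_vc_dimension : Prop := ∀ (family : List (List Int)) (universe_size : Int), Dom_vc_dimension family universe_size → Spec_vc_dimension family universe_size (vc_dimension family universe_size)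

-- ===== LEMMAS AND PROOFS =====

theorem pvMaskSub_cons (x : Int) (tl : List Int) (b : Nat) :
    pvMaskSub (x :: tl) b
      = if b.testBit 0 then x :: pvMaskSub tl (b / 2) else pvMaskSub tl (b / 2) := by
  have h : ((fun j => if b.testBit j then (x :: tl)[j]? else none) ∘ Nat.succ)
      = (fun j => if (b/2).testBit j then tl[j]? else none) := by
    funext j; simp [Function.comp, Nat.testBit_add_one]
  simp only [pvMaskSub, List.length_cons, List.range_succ_eq_map, List.filterMap_cons,
    List.filterMap_map, h]
  cases hb : b.testBit 0 <;> simp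

theorem pvMaskSub_sublist (tl : List Int) (b : Nat) : (pvMaskSub tl b).Sublist tl := by
  induction tl generalizing b with
  | nil => simp [pvMaskSub]
  | cons x xs ih =>
    rw [pvMaskSub_cons]
    split
    · exact (ih _).cons₂ x
    · exact (ih _).cons x

theorem pvMaskSub_of_sublist {u tl : List Int} (h : u.Sublist tl) :
    ∃ b < 2 ^ tl.length, pvMaskSub tl b = u := by
  induction h with
  | slnil => exact ⟨0, by simp, by simp [pvMaskSub]⟩
  | @cons l₁ l₂ x h ih =>
    obtain ⟨b, hb, he⟩ := ih
    refine ⟨2 * b, by simp only [List.length_cons, pow_succ]; omega, ?_⟩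
    rw [pvMaskSub_cons]
    have : (2*b).testBit 0 = false := by simp [Nat.testBit_zero]
    rw [this]; simpa using he
  | @cons₂ l₁ l₂ x h ih =>
    obtain ⟨b, hb, he⟩ := ih
    refine ⟨2 * b + 1, by simp only [List.length_cons, pow_succ]; omega, ?_⟩
    rw [pvMaskSub_cons]
    have h0 : (2*b+1).testBit 0 = true := by simp [Nat.testBit_zero]
    have h2 : (2*b+1)/2 = b := by omega
    rw [h0, h2, he]; simp
theorem pvMaskSub_inj {tl : List Int} (hn : tl.Nodup) {b1 b2 : Nat}
    (h1 : b1 < 2 ^ tl.length) (h2 : b2 < 2 ^ tl.length)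
    (he : pvMaskSub tl b1 = pvMaskSub tl b2) : b1 = b2 := by
  induction tl generalizing b1 b2 with
  | nil => simp at h1 h2; omega
  | cons x xs ih =>
    rw [List.nodup_cons] at hn
    rw [pvMaskSub_cons, pvMaskSub_cons] at he
    simp only [List.length_cons, pow_succ] at h1 h2
    cases hb1 : b1.testBit 0 <;> cases hb2 : b2.testBit 0 <;> rw [hb1, hb2] at he <;> simp at he
    · have := ih hn.2 (b1 := b1/2) (b2 := b2/2) (by omega) (by omega) he
      simp [Nat.testBit_zero] at hb1 hb2; omega
    · exact absurd ((pvMaskSub_sublist xs (b1/2)).subset (he ▸ List.mem_cons_self ..)) hn.1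
    · exact absurd ((pvMaskSub_sublist xs (b2/2)).subset (he.symm ▸ List.mem_cons_self ..)) hn.1
    · have := ih hn.2 (b1 := b1/2) (b2 := b2/2) (by omega) (by omega) he
      simp [Nat.testBit_zero] at hb1 hb2; omega

theorem pv_filter_of_sublist {v w : List Int} (h : v.Sublist w) (hn : w.Nodup) :
    w.filter (fun x => decide (x ∈ v)) = v := by
  induction h with
  | slnil => rfl
  | @cons l₁ l₂ x h ih =>
    rw [List.nodup_cons] at hn
    have hx : x ∉ l₁ := fun hm => hn.1 (h.subset hm)
    simp only [List.filter_cons, decide_eq_true_eq]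
    rw [if_neg (by simp [hx])]
    exact ih hn.2
  | @cons₂ l₁ l₂ x h ih =>
    rw [List.nodup_cons] at hn
    simp only [List.filter_cons]
    rw [if_pos (by simp)]
    have : l₂.filter (fun y => decide (y ∈ x :: l₁)) = l₂.filter (fun y => decide (y ∈ l₁)) := by
      apply List.filter_congr
      intro y hy
      have : y ≠ x := fun hyx => hn.1 (hyx ▸ hy)
      simp [List.mem_cons, this]
    rw [this, ih hn.2]
theorem pv_nodup_of_pairwise {l : List Int} (h : l.Pairwise (· < ·)) : l.Nodup :=
  h.imp (fun hlt => ne_of_lt hlt)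

theorem pv_mem_needed {tl : List Int} {x : List Int} :
    (x ∈ (List.range (2 ^ tl.length)).map (fun bits => pvMaskSub tl bits)) ↔ x.Sublist tl := by
  simp only [List.mem_map, List.mem_range]
  constructor
  · rintro ⟨b, _, rfl⟩; exact pvMaskSub_sublist tl b
  · intro h; obtain ⟨b, hb, he⟩ := pvMaskSub_of_sublist h; exact ⟨b, hb, he⟩

theorem pvShattersA_iff (family : List (List Int)) (tl : List Int)
    (hp : tl.Pairwise (· < ·)) :
    pvShattersA family tl = true
      ↔ ∀ u, u.Sublist tl → ∃ S ∈ family, tl.filter (fun x => S.contains x) = u := by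
  have hsort : PySem.List.sorted tl (fun x => x) false = tl :=
    PySem.List.sorted_eq_self_of_pairwise tl (fun x => x) (hp.imp (fun h => le_of_lt h))
  simp only [pvShattersA, hsort]
  rw [PySem.Set.issubset_iff]
  constructor
  · intro h u hu
    have := h u (by rw [PySem.Set.mem_ofList]; exact pv_mem_needed.mpr hu)
    rw [PySem.Set.mem_ofList, List.mem_map] at this
    obtain ⟨S, hS, he⟩ := this
    exact ⟨S, hS, he⟩
  · intro h x hx
    rw [PySem.Set.mem_ofList] at hx
    obtain ⟨S, hS, he⟩ := h x (pv_mem_needed.mp hx)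
    rw [PySem.Set.mem_ofList, List.mem_map]
    exact ⟨S, hS, he⟩

theorem pvShatters_bridge (family : List (List Int)) (tl : List Int)
    (hp : tl.Pairwise (· < ·)) :
    pvShattersB family tl tl.length = pvShattersA family tl := by
  have hn : tl.Nodup := pv_nodup_of_pairwise hp
  have hsort : PySem.List.sorted tl (fun x => x) false = tl :=
    PySem.List.sorted_eq_self_of_pairwise tl (fun x => x) (hp.imp (fun h => le_of_lt h))
  set NL := (List.range (2 ^ tl.length)).map (fun bits => pvMaskSub tl bits) with hNL
  set ach := PySem.Set.ofList (family.map (fun S => tl.filter (fun x => S.contains x))) with hach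
  have hNLnodup : NL.Nodup := by
    apply (List.nodup_range).map_on
    intro b1 hb1 b2 hb2 he
    exact pvMaskSub_inj hn (List.mem_range.mp hb1) (List.mem_range.mp hb2) he
  have hNLlen : NL.length = 2 ^ tl.length := by simp [hNL]
  have hachnodup : ach.Nodup := PySem.Set.nodup_ofList _
  have hachsub : ach ⊆ NL := by
    intro y hy
    rw [hach, PySem.Set.mem_ofList, List.mem_map] at hy
    obtain ⟨S, _, rfl⟩ := hy
    exact pv_mem_needed.mpr (List.filter_sublist)
  have hneed : PySem.Set.ofList NL = NL := PySem.Set.ofList_eq_self_of_nodup NL hNLnodup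
  simp only [pvShattersB, pvShattersA, hsort, ← hNL, ← hach, hneed]
  rw [Bool.eq_iff_iff, beq_iff_eq, PySem.Set.issubset_iff]
  constructor
  · intro hlen x hx
    have hsp : ach.Subperm NL := List.subperm_of_subset hachnodup hachsub
    have hperm : ach.Perm NL := hsp.perm_of_length_le (by omega)
    exact hperm.symm.subset hx
  · intro hsub
    have h1 : NL.Subperm ach := List.subperm_of_subset hNLnodup (fun y hy => hsub y hy)
    have h2 : ach.Subperm NL := List.subperm_of_subset hachnodup hachsub
    have := h1.length_le
    have := h2.length_le
    omega
theorem pvShattersA_sublist (family : List (List Int)) {t t' : List Int}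
    (h : t'.Sublist t) (hp : t.Pairwise (· < ·)) (ha : pvShattersA family t = true) :
    pvShattersA family t' = true := by
  have hp' : t'.Pairwise (· < ·) := hp.sublist h
  rw [pvShattersA_iff family t hp] at ha
  rw [pvShattersA_iff family t' hp']
  intro u hu
  obtain ⟨S, hS, he⟩ := ha u (hu.trans h)
  refine ⟨S, hS, ?_⟩
  have hcongr : t'.filter (fun x => S.contains x) = t'.filter (fun x => decide (x ∈ u)) := by
    apply List.filter_congr
    intro y hy
    have hyt : y ∈ t := h.subset hy
    have : y ∈ u ↔ (y ∈ t ∧ S.contains y = true) := by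
      rw [← he, List.mem_filter]
    cases hc : S.contains y
    · have hyu : y ∉ u := fun hm => by rw [hc] at this; simpa using (this.mp hm).2
      simp [hyu]
    · have hyu : y ∈ u := this.mpr ⟨hyt, hc⟩
      simp [hyu]
  rw [hcongr, pv_filter_of_sublist hu (pv_nodup_of_pairwise hp')]

def pvQ (family : List (List Int)) (u : Int) (s : Nat) : Bool :=
  (List.sublistsLen s (PySem.List.pyRange 0 u 1)).any (fun t => pvShattersA family t)

def pvF (Q : Nat → Bool) : Nat → Nat
  | 0 => 0
  | n + 1 => if Q (n + 1) then n + 1 else pvF Q n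

theorem pv_pairwise_of_mem_sublistsLen {u : Int} {s : Nat} {t : List Int}
    (h : t ∈ List.sublistsLen s (PySem.List.pyRange 0 u 1)) :
    t.Pairwise (· < ·) ∧ t.Sublist (PySem.List.pyRange 0 u 1) ∧ t.length = s := by
  obtain ⟨hsub, hlen⟩ := List.mem_sublistsLen.mp h
  exact ⟨(PySem.List.pairwise_lt_pyRange_one 0 u).sublist hsub, hsub, hlen⟩

theorem pvQ_mono (family : List (List Int)) (u : Int) (s : Nat)
    (h : pvQ family u (s + 1) = true) : pvQ family u s = true := by
  rw [pvQ, List.any_eq_true] at h ⊢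
  obtain ⟨t, ht, hsh⟩ := h
  obtain ⟨hpt, hsub, hlen⟩ := pv_pairwise_of_mem_sublistsLen ht
  refine ⟨t.tail, List.mem_sublistsLen.mpr ⟨(List.tail_sublist t).trans hsub, by simp [hlen]⟩, ?_⟩
  exact pvShattersA_sublist family (List.tail_sublist t) hpt hsh

theorem pv_sublist_of_subset_sorted {t w : List Int} (h1 : t.Pairwise (· < ·))
    (h2 : w.Pairwise (· < ·)) (hs : t ⊆ w) : t.Sublist w := by
  induction w generalizing t with
  | nil => rw [List.subset_nil.mp hs]
  | cons y ws ih =>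
    cases t with
    | nil => exact List.nil_sublist _
    | cons x ts =>
      rcases List.pairwise_cons.mp h1 with ⟨hx, h1'⟩
      rcases List.pairwise_cons.mp h2 with ⟨hy, h2'⟩
      by_cases hxy : x = y
      · subst hxy
        refine List.Sublist.cons₂ x (ih h1' h2' ?_)
        intro z hz
        rcases List.mem_cons.mp (hs (List.mem_cons_of_mem x hz)) with hzy | hzw
        · exact absurd (hzy ▸ hx z hz) (lt_irrefl _)
        · exact hzw
      · have hxw : x ∈ ws := by
          rcases List.mem_cons.mp (hs (List.mem_cons_self ..)) with h | h
          · exact absurd h hxy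
          · exact h
        refine List.Sublist.cons y (ih h1 h2' ?_)
        intro z hz
        rcases List.mem_cons.mp (hs hz) with hzy | hzw
        · exfalso
          rcases List.mem_cons.mp hz with rfl | hzt
          · exact hxy hzy
          · exact absurd (hzy ▸ (hy x hxw)) (not_lt_of_gt (hx z hzt))
        · exact hzw

theorem pv_support_pairwise (family : List (List Int)) (u : Int) :
    (pvSupport family u).Pairwise (· < ·) :=
  PySem.List.sorted_ofList_pairwise_lt _

theorem pv_mem_support {family : List (List Int)} {u : Int} {x : Int} :
    x ∈ pvSupport family u ↔ ∃ S ∈ family, x ∈ S ∧ 0 ≤ x ∧ x < u := by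
  rw [pvSupport, PySem.List.mem_sorted, PySem.Set.mem_ofList, List.mem_flatMap]
  constructor
  · rintro ⟨S, hS, hx⟩
    rw [List.mem_filter, decide_eq_true_eq] at hx
    exact ⟨S, hS, hx.1, hx.2⟩
  · rintro ⟨S, hS, h1, h2⟩
    exact ⟨S, hS, List.mem_filter.mpr ⟨h1, by simpa using h2⟩⟩

-- any element of a shattered target is supported: the required singleton subset is an intersection
theorem pv_target_sublist_support {family : List (List Int)} {u : Int} {t : List Int}
    (hsub : t.Sublist (PySem.List.pyRange 0 u 1)) (hsh : pvShattersA family t = true) :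
    t.Sublist (pvSupport family u) := by
  have hpt : t.Pairwise (· < ·) := (PySem.List.pairwise_lt_pyRange_one 0 u).sublist hsub
  refine pv_sublist_of_subset_sorted hpt (pv_support_pairwise family u) ?_
  intro x hx
  rw [pvShattersA_iff family t hpt] at hsh
  obtain ⟨S, hS, he⟩ := hsh [x] (List.singleton_sublist.mpr hx)
  have hxS : x ∈ S := by
    have : x ∈ t.filter (fun y => S.contains y) := he ▸ List.mem_singleton_self x
    simpa using (List.mem_filter.mp this).2
  have hxr := PySem.List.mem_pyRange_one.mp (hsub.subset hx)
  exact pv_mem_support.mpr ⟨S, hS, hxS, by omega, by omega⟩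

-- B's per-size test over the support agrees with A's per-size test over range(u)
theorem pvAnyU (family : List (List Int)) (u : Int) (s : Nat) :
    (List.sublistsLen s (pvSupport family u)).any (fun t => pvShattersB family t s)
      = pvQ family u s := by
  rw [pvQ, Bool.eq_iff_iff, List.any_eq_true, List.any_eq_true]
  constructor
  · rintro ⟨t, ht, hsh⟩
    obtain ⟨hsub, hlen⟩ := List.mem_sublistsLen.mp ht
    have hpt : t.Pairwise (· < ·) := (pv_support_pairwise family u).sublist hsub
    rw [← hlen, pvShatters_bridge family t hpt] at hsh
    have htr : t.Sublist (PySem.List.pyRange 0 u 1) := by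
      refine pv_sublist_of_subset_sorted hpt (PySem.List.pairwise_lt_pyRange_one 0 u) ?_
      intro x hx
      obtain ⟨S, hS, hxS, h0, hu⟩ := pv_mem_support.mp (hsub.subset hx)
      exact PySem.List.mem_pyRange_one.mpr ⟨h0, hu⟩
    exact ⟨t, List.mem_sublistsLen.mpr ⟨htr, hlen⟩, hsh⟩
  · rintro ⟨t, ht, hsh⟩
    obtain ⟨hsub, hlen⟩ := List.mem_sublistsLen.mp ht
    have hpt : t.Pairwise (· < ·) := (PySem.List.pairwise_lt_pyRange_one 0 u).sublist hsub
    refine ⟨t, List.mem_sublistsLen.mpr ⟨pv_target_sublist_support hsub hsh, hlen⟩, ?_⟩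
    rw [← hlen, pvShatters_bridge family t hpt, hsh]

-- a successful size is at most the support's size
theorem pvQ_len (family : List (List Int)) (u : Int) (s : Nat)
    (h : pvQ family u s = true) : s ≤ (pvSupport family u).length := by
  rw [pvQ, List.any_eq_true] at h
  obtain ⟨t, ht, hsh⟩ := h
  obtain ⟨hsub, hlen⟩ := List.mem_sublistsLen.mp ht
  calc s = t.length := hlen.symm
    _ ≤ _ := (pv_target_sublist_support hsub hsh).length_le

theorem pvQ_card (family : List (List Int)) (u : Int) (s : Nat)
    (h : pvQ family u s = true) : 2 ^ s ≤ family.length := by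
  rw [pvQ, List.any_eq_true] at h
  obtain ⟨t, ht, hsh⟩ := h
  obtain ⟨hpt, _, hlen⟩ := pv_pairwise_of_mem_sublistsLen ht
  have := pvShatters_bridge family t hpt
  rw [hsh] at this
  rw [pvShattersB, beq_iff_eq] at this
  calc 2 ^ s = 2 ^ t.length := by rw [hlen]
    _ = _ := this.symm
    _ ≤ (family.map (fun S => t.filter (fun x => S.contains x))).length :=
        PySem.Set.length_ofList_le _
    _ = family.length := List.length_map ..
theorem pvF_of_true {Q : Nat → Bool} {m : Nat} (h : Q m = true) : pvF Q m = m := by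
  cases m with
  | zero => rfl
  | succ k => simp [pvF, h]

theorem pvQ_false_up (family : List (List Int)) (u : Int) {s k : Nat}
    (h : pvQ family u s = false) (hk : s ≤ k) : pvQ family u k = false := by
  induction k with
  | zero => exact (show s = 0 by omega) ▸ h
  | succ m ih =>
    rcases Nat.lt_or_ge s (m+1) with hlt | hge
    · cases hq : pvQ family u (m+1)
      · rfl
      · have := pvQ_mono family u m hq
        rw [ih (by omega)] at this; exact absurd this (by simp)
    · have : s = m + 1 := by omega
      exact this ▸ h
  
theorem pvF_stuck {Q : Nat → Bool} {j n : Nat} (hj : j ≤ n)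
    (hfalse : ∀ k, j < k → k ≤ n → Q k = false) : pvF Q n = pvF Q j := by
  induction n with
  | zero => exact (show j = 0 by omega) ▸ rfl
  | succ m ih =>
    rcases Nat.lt_or_ge j (m+1) with hlt | hge
    · rw [pvF, hfalse (m+1) (by omega) le_rfl]
      simp only [Bool.false_eq_true, if_false]
      exact ih (by omega) (fun k h1 h2 => hfalse k h1 (by omega))
    · have : j = m + 1 := by omega
      exact this ▸ rfl

theorem pvBLoop_eq (family : List (List Int)) (u : Int) (n : Nat) :
    pvBLoop family (pvSupport family u) (PySem.List.pyRange (n : Int) (-1) (-1))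
      = (pvF (pvQ family u) n : Int) := by
  induction n with
  | zero =>
    rw [PySem.List.pyRange_neg_one_cons (by norm_num)]
    rw [show ((0:Nat):Int) - 1 = -1 by norm_num, PySem.List.pyRange_neg_one_eq_nil le_rfl]
    rw [pvBLoop]
    split <;> rfl
  | succ m ih =>
    rw [PySem.List.pyRange_neg_one_cons (by push_cast; omega)]
    rw [show ((m+1:Nat):Int) - 1 = (m:Int) by push_cast; ring]
    rw [pvBLoop]
    rw [show ((m+1:Nat):Int).toNat = m+1 from Int.toNat_natCast _]
    rw [pvAnyU]
    cases hq : pvQ family u (m+1)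
    · simp only [Bool.false_eq_true, if_false, ih, pvF, hq]
    · simp only [if_true, pvF, hq]

theorem pvALoop_eq (family : List (List Int)) (u : Int) (n : Nat)
    (k s : Nat) (hs : 1 ≤ s) (hk : s + k = n + 1) (hq : pvQ family u (s - 1) = true) :
    pvALoop family u (PySem.List.pyRange (s : Int) ((n : Int) + 1) 1) ((s : Int) - 1)
      = (pvF (pvQ family u) n : Int) := by
  induction k generalizing s with
  | zero =>
    have hsn : s = n + 1 := by omega
    subst hsn
    rw [PySem.List.pyRange_one_eq_nil (by push_cast; omega)]
    rw [pvALoop]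
    have h2 : pvF (pvQ family u) n = n := pvF_of_true (by simpa using hq)
    rw [h2]; push_cast; ring
  | succ m ih =>
    have hsn : s ≤ n := by omega
    rw [PySem.List.pyRange_one_cons (by omega)]
    rw [pvALoop]
    rw [show ((s:Int)).toNat = s from Int.toNat_natCast _]
    rw [show (List.sublistsLen s (PySem.List.pyRange 0 u 1)).any (fun t => pvShattersA family t)
          = pvQ family u s from rfl]
    cases hqs : pvQ family u s
    · simp only [Bool.false_eq_true, if_false]
      have h1 : pvF (pvQ family u) n = pvF (pvQ family u) (s - 1) :=
        pvF_stuck (by omega) (fun k h1 _ => pvQ_false_up family u hqs (by omega))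
      rw [h1, pvF_of_true hq]
      omega
    · simp only [if_true]
      have := ih (s + 1) (by omega) (by omega) (by simpa using hqs)
      push_cast at this ⊢
      convert this using 2
      ring
theorem pv_main (family : List (List Int)) (u : Int) :
    vc_dimension family u = vc_dimension_alt family u := by
  by_cases hf : family = []
  · subst hf
    rw [vc_dimension_alt, if_pos rfl, vc_dimension]
    rcases le_or_gt (u + 1) 0 with h | h
    · rw [PySem.List.pyRange_one_eq_nil h]; rfl
    · rw [PySem.List.pyRange_one_cons (by omega)]
      rw [pvALoop]
      norm_num [List.sublistsLen_zero]
      rw [show pvShattersA [] [] = false from rfl]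
      simp
  · rw [vc_dimension_alt, if_neg hf]
    have hlen1 : 1 ≤ family.length := List.length_pos_of_ne_nil hf
    have hlt := PySem.Int.lt_two_pow_bitLength ((family.length : Int))
    rw [Int.natAbs_natCast] at hlt
    have hbl1 : 1 ≤ PySem.Int.bitLength ((family.length : Int)) := by
      by_contra hc
      have hz : PySem.Int.bitLength ((family.length : Int)) = 0 := by omega
      rw [hz, pow_zero] at hlt
      omega
    have hh : min (((pvSupport family u).length : Int))
        ((PySem.Int.bitLength (family.length : Int) : Int) - 1)
        = ((min (pvSupport family u).length (PySem.Int.bitLength (family.length : Int) - 1) : Nat) : Int) := by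
      rw [Nat.cast_min]
      congr 1
      omega
    set h := min (pvSupport family u).length (PySem.Int.bitLength (family.length : Int) - 1) with hdef
    rw [hh, pvBLoop_eq]
    rcases lt_or_ge u 0 with hu | hu
    · -- negative universe: A's size loop is empty; B's support is empty, so h = 0 and pvF _ 0 = 0
      rw [vc_dimension, PySem.List.pyRange_one_eq_nil (by omega)]
      have hsupp : pvSupport family u = [] := by
        rw [List.eq_nil_iff_forall_not_mem]
        intro x hx
        obtain ⟨S, _, _, h0, hltu⟩ := pv_mem_support.mp hx
        omega
      have : h = 0 := by rw [hdef, hsupp]; simp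
      rw [this]
      rfl
    · obtain ⟨n, rfl⟩ : ∃ n : Nat, u = (n : Int) := ⟨u.toNat, (Int.toNat_of_nonneg hu).symm⟩
      have hsuppn : (pvSupport family ((n : Int))).length ≤ n := by
        have hnd : (pvSupport family ((n : Int))).Nodup :=
          (pv_support_pairwise family _).imp (fun hlt' => ne_of_lt hlt')
        have hsubs : pvSupport family ((n : Int)) ⊆ PySem.List.pyRange 0 ((n : Int)) 1 := by
          intro x hx
          obtain ⟨S, _, _, h0, hltu⟩ := pv_mem_support.mp hx
          exact PySem.List.mem_pyRange_one.mpr ⟨h0, hltu⟩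
        have := (List.subperm_of_subset hnd hsubs).length_le
        rw [PySem.List.length_pyRange_one] at this
        omega
      have hhn : h ≤ n := by omega
      have hFeq : pvF (pvQ family ((n : Int))) n = pvF (pvQ family ((n : Int))) h := by
        apply pvF_stuck hhn
        intro k hk1 _
        cases hqk : pvQ family ((n : Int)) k
        · rfl
        · exfalso
          rcases Nat.lt_or_ge k (PySem.Int.bitLength ((family.length : Int))) with hkb | hkb
          · have := pvQ_len family _ k hqk
            omega
          · have hcard := pvQ_card family _ k hqk
            have hpow : 2 ^ PySem.Int.bitLength ((family.length : Int)) ≤ 2 ^ k :=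
              Nat.pow_le_pow_right (by norm_num) hkb
            omega
      rw [vc_dimension]
      rw [PySem.List.pyRange_one_cons (by omega)]
      rw [pvALoop]
      rw [show ((0 : Int)).toNat = 0 from rfl]
      rw [show (List.sublistsLen 0 (PySem.List.pyRange 0 ((n : Int)) 1)).any
            (fun t => pvShattersA family t) = pvQ family ((n : Int)) 0 from rfl]
      cases hq0 : pvQ family ((n : Int)) 0
      · simp only [Bool.false_eq_true, if_false]
        have hstuck : pvF (pvQ family ((n : Int))) h = pvF (pvQ family ((n : Int))) 0 :=
          pvF_stuck (Nat.zero_le h) (fun k hk1 _ => pvQ_false_up family _ hq0 (by omega))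
        rw [hstuck]
        rfl
      · simp only [if_true]
        have hA := pvALoop_eq family ((n : Int)) n n 1 le_rfl (by omega) (by simpa using hq0)
        push_cast at hA
        rw [show ((0:Int) + 1) = 1 by norm_num, hA, hFeq]

-- ===== VERDICT (by name: the statement is the Claim_ definition above) =====
theorem vc_dimension_spec : Claim_equal_vc_dimension := by
  intro family universe_size _
  exact pv_main family universe_size
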